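-- pv_equiv track=rewrite | github.com/iroshanvidanage/python | AlgorithmicToolbox/Greedy Algorithms/GC.py | points_cover_sorted
-- ===== SOURCE A (Python) =====
-- def points_cover_sorted(sorted_list):
--     grouped_list = []
--     i = 0
--     n = len(sorted_list)
--
--     while i < n:
--         left_most = sorted_list[i]
--         right_most = left_most + 1
--
--         while i < n and sorted_list[i] <= right_most:
--             i += 1
--
--         grouped_list.append(sorted_list[sorted_list.index(left_most):i])
--
--     return grouped_list
-- ===== SOURCE B (Python) =====
-- def points_cover_sorted(sorted_list):
--     # Single element-wise pass: grow the current run or flush it and start a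
--     # new one; no slicing, no inner scan, no list.index search.
--     grouped_list = []
--     current = []
--     for x in sorted_list:
--         if current and x <= current[0] + 1:
--             current.append(x)
--         else:
--             if current:
--                 grouped_list.append(current)
--             current = [x]
--     if current:
--         grouped_list.append(current)
--     return grouped_list
-- ===== Notes on version B (the rewrite author's own statement) =====
-- stated objective: faster
-- what changed: Replaces A's nested while-loops with index arithmetic, per-group slicing and a repeated list.index() scan by a single element-wise pass that appends each point to the current run (when it is within leader+1) or flushes the run and starts a new one; intended as faster (O(n) vs A's O(n*g) from list.index rescanning), measured >500x on the sorted input family where A timed out at n=65536, 1.45x on random inputs.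
import Mathlib
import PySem

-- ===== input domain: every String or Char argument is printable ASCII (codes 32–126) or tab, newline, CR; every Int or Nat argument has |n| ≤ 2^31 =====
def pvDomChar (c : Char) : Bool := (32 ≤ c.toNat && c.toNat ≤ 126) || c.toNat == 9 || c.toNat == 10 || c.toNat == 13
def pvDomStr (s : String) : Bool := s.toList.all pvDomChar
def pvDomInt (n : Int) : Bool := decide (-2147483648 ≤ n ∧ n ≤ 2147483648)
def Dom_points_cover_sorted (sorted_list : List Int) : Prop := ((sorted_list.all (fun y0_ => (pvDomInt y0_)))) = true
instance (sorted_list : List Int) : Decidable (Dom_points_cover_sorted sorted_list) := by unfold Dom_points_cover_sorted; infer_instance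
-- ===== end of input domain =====

-- B replaces A's nested while-loops, per-group slicing and list.index() search by a
-- single element-wise pass that grows the current run or flushes it (alternative).

-- ===== PORT A =====
-- inner 'while i < n and sorted_list[i] <= right_most: i += 1' (returns the final i);
-- the index i stays in [0, n] by the guard, so pyGetD is exact.
def pvScanA (sl : List Int) (rm : Int) (i : Nat) : Nat :=
  if h : i < sl.length ∧ PySem.List.pyGetD sl (i : Int) 0 ≤ rm then pvScanA sl rm (i + 1) else i
termination_by sl.length - i
decreasing_by exact Nat.sub_succ_lt_self sl.length i h.1

-- termination fact for the outer while loop (i strictly advances each iteration)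
theorem pvScanA_le (sl : List Int) (rm : Int) (i : Nat) : i ≤ pvScanA sl rm i := by
  fun_induction pvScanA <;> omega

theorem pvScanA_gt (sl : List Int) (rm : Int) (i : Nat) (h1 : i < sl.length)
    (h2 : PySem.List.pyGetD sl (i : Int) 0 ≤ rm) : i < pvScanA sl rm i := by
  rw [pvScanA, dif_pos ⟨h1, h2⟩]
  exact Nat.lt_of_lt_of_le (Nat.lt_succ_self i) (pvScanA_le sl rm (i + 1))

-- outer 'while i < n: …'; sorted_list.index(left_most) cannot raise (left_most = sorted_list[i]),
-- so index?.getD 0 is exact here.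
def pvOuterA (sl : List Int) (i : Nat) (acc : List (List Int)) : List (List Int) :=
  if h : i < sl.length then
    let lm := PySem.List.pyGetD sl (i : Int) 0
    let j := pvScanA sl (lm + 1) i
    pvOuterA sl j (acc ++ [PySem.List.slice sl (some (((PySem.List.index? sl lm).getD 0 : Nat) : Int)) (some (j : Int))])
  else acc
termination_by sl.length - i
decreasing_by
  exact Nat.sub_lt_sub_left h
    (pvScanA_gt sl (PySem.List.pyGetD sl (i : Int) 0 + 1) i h (le_of_lt (lt_add_one _)))

def points_cover_sorted (sorted_list : List Int) : List (List Int) :=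
  pvOuterA sorted_list 0 []

-- ===== PORT B =====
-- loop body: 'if current and x <= current[0] + 1: current.append(x)
--             else: (if current: grouped_list.append(current)); current = [x]'
def pvStepB (p : List (List Int) × List Int) (x : Int) : List (List Int) × List Int :=
  match p.2 with
  | [] => (p.1, [x])
  | c :: _ => if x ≤ c + 1 then (p.1, p.2 ++ [x]) else (p.1 ++ [p.2], [x])

-- trailing 'if current: grouped_list.append(current)'
def pvFinB (p : List (List Int) × List Int) : List (List Int) :=
  match p.2 with
  | [] => p.1
  | _ => p.1 ++ [p.2]

def points_cover_sorted_alt (sorted_list : List Int) : List (List Int) :=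
  pvFinB (sorted_list.foldl pvStepB ([], []))

-- ===== PRECONDITION & SPEC =====
def Spec_points_cover_sorted (sorted_list : List Int) (out : List (List Int)) : Prop := out = points_cover_sorted_alt sorted_list
instance (sorted_list : List Int) (out : List (List Int)) : Decidable (Spec_points_cover_sorted sorted_list out) := by unfold Spec_points_cover_sorted; infer_instance

-- ===== CLAIM (what is proved, stated in full; the proofs are below) =====
def Claim_equal_points_cover_sorted : Prop := ∀ (sorted_list : List Int), Dom_points_cover_sorted sorted_list → Spec_points_cover_sorted sorted_list (points_cover_sorted sorted_list)

-- ===== LEMMAS AND PROOFS =====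

-- the run predicate: an element still belongs to the group with leader lm
def pvP (lm : Int) (y : Int) : Bool := y ≤ lm + 1

-- common reference shape: the greedy grouping, structurally
def pvG : List Int → List (List Int)
  | [] => []
  | x :: t => (x :: t.takeWhile (pvP x)) :: pvG (t.dropWhile (pvP x))
termination_by xs => xs.length
decreasing_by
  exact Nat.lt_succ_of_le (List.length_dropWhile_le (pvP x) t)

theorem pvGetD_of_drop (sl : List Int) (i : Nat) (x : Int) (t : List Int)
    (h : sl.drop i = x :: t) : PySem.List.pyGetD sl (i : Int) 0 = x := by
  have h0 : sl[i]? = some x := by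
    have hh := congrArg (fun l => l[0]?) h
    simpa [List.getElem?_drop] using hh
  simp [PySem.List.pyGetD_natCast, List.getD, h0]

-- the inner scan computes i + |takeWhile| of the suffix
theorem pvScan_eq (sl : List Int) (rm : Int) :
    ∀ xs i, sl.drop i = xs → pvScanA sl rm i = i + (xs.takeWhile (fun y => decide (y ≤ rm))).length := by
  intro xs
  induction xs with
  | nil =>
    intro i hx
    have : sl.length ≤ i := List.drop_eq_nil_iff.mp hx
    rw [pvScanA, dif_neg (by omega)]; simp
  | cons x t ih =>
    intro i hx
    have hi : i < sl.length := by
      by_contra h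
      rw [List.drop_eq_nil_iff.mpr (by omega)] at hx
      exact List.cons_ne_nil x t hx.symm
    have hget := pvGetD_of_drop sl i x t hx
    have ht : sl.drop (i + 1) = t := by
      have : sl.drop (i + 1) = (sl.drop i).drop 1 := by rw [List.drop_drop]
      rw [this, hx, List.drop_one, List.tail_cons]
    by_cases hc : x ≤ rm
    · rw [pvScanA, dif_pos ⟨hi, by rw [hget]; exact hc⟩, ih (i + 1) ht]
      simp [hc]; omega
    · rw [pvScanA, dif_neg (by rw [hget]; exact fun h => hc h.2)]
      simp [List.takeWhile_cons, hc]

-- A's outer loop computes the greedy grouping: invariant — everything before i is ≤ b,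
-- and the next leader (head of the suffix) exceeds b, so list.index finds it at i.
theorem pvAmain (sl : List Int) :
    ∀ (n : Nat) (xs : List Int), xs.length ≤ n → ∀ (i : Nat) (acc : List (List Int)) (b : Int),
      sl.drop i = xs → (∀ y ∈ sl.take i, y ≤ b) → (∀ x' t', xs = x' :: t' → b < x') →
      pvOuterA sl i acc = acc ++ pvG xs := by
  intro n
  induction n with
  | zero =>
    intro xs hn i acc b hx _ _
    have : xs = [] := List.eq_nil_of_length_eq_zero (by omega)
    subst this
    have : sl.length ≤ i := List.drop_eq_nil_iff.mp hx
    rw [pvOuterA, dif_neg (by omega), pvG]; simp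
  | succ m ih =>
    intro xs hn i acc b hx hle hlt
    cases xs with
    | nil =>
      have : sl.length ≤ i := List.drop_eq_nil_iff.mp hx
      rw [pvOuterA, dif_neg (by omega), pvG]; simp
    | cons x t =>
      have hi : i < sl.length := by
        by_contra h
        rw [List.drop_eq_nil_iff.mpr (by omega)] at hx
        exact List.cons_ne_nil x t hx.symm
      have hget := pvGetD_of_drop sl i x t hx
      have hbx : b < x := hlt x t rfl
      -- list.index(left_most) = i
      have hsplit : sl = sl.take i ++ x :: t := by
        conv_lhs => rw [← List.take_append_drop i sl, hx]
      have hidx : PySem.List.index? sl x = some i := by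
        rw [PySem.List.index?_eq_some_iff]
        refine ⟨sl.take i, t, hsplit, by simp [List.length_take]; omega, ?_⟩
        intro hmem
        exact absurd (hle x hmem) (by omega)
      -- the scan end
      set tw := t.takeWhile (pvP x) with htw
      set dw := t.dropWhile (pvP x) with hdw
      have hscan : pvScanA sl (x + 1) i = i + 1 + tw.length := by
        have hq : (fun y => decide (y ≤ x + 1)) = pvP x := rfl
        rw [pvScan_eq sl (x + 1) (x :: t) i hx, hq, List.takeWhile_cons,
          if_pos (by simp [pvP])]
        simp [htw]; omega
      have htdec : t = tw ++ dw := (List.takeWhile_append_dropWhile (p := pvP x) (l := t)).symm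
      -- the slice is exactly the group
      have hslice : PySem.List.slice sl (some ((i : Nat) : Int)) (some ((i + 1 + tw.length : Nat) : Int))
          = x :: tw := by
        rw [PySem.List.slice_natCast]
        have h1 : i + 1 + tw.length - i = 1 + tw.length := by omega
        rw [h1, hx]
        have : (x :: t).take (1 + tw.length) = x :: t.take tw.length := by
          simp [Nat.add_comm 1 tw.length]
        rw [this, htdec, List.take_left]
      -- the next suffix
      have hdrop : sl.drop (i + 1 + tw.length) = dw := by
        have h2 : sl.drop (i + 1 + tw.length) = (sl.drop i).drop (1 + tw.length) := by
          rw [List.drop_drop]; ring_nf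
        rw [h2, hx]
        have : (x :: t).drop (1 + tw.length) = t.drop tw.length := by
          simp [Nat.add_comm 1 tw.length]
        rw [this, htdec, List.drop_left]
      -- invariant propagation
      have htake' : ∀ y ∈ sl.take (i + 1 + tw.length), y ≤ x + 1 := by
        intro y hy
        have h3 : sl.take (i + 1 + tw.length) = sl.take i ++ (sl.drop i).take (1 + tw.length) := by
          rw [← List.take_add]; ring_nf
        rw [h3, hx] at hy
        rcases List.mem_append.mp hy with h | h
        · have := hle y h; omega
        · have : (x :: t).take (1 + tw.length) = x :: tw := by
            have h4 : (x :: t).take (1 + tw.length) = x :: t.take tw.length := by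
              simp [Nat.add_comm 1 tw.length]
            rw [h4, htdec, List.take_left]
          rw [this] at h
          rcases List.mem_cons.mp h with h | h
          · omega
          · have := List.mem_takeWhile_imp (htw ▸ h)
            simpa [pvP] using this
      have hnext : ∀ x' t', dw = x' :: t' → x + 1 < x' := by
        intro x' t' hd
        have : ¬ (pvP x x' = true) := by
          have := List.head?_dropWhile_not (p := pvP x) (l := t)
          rw [← hdw, hd] at this
          simpa using this
        simpa [pvP, not_le] using this
      have hlen : dw.length ≤ m := by
        have h5 := List.length_dropWhile_le (pvP x) t
        have : (x :: t).length ≤ m + 1 := hn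
        simp at this
        rw [hdw]; omega
      rw [pvOuterA, dif_pos hi]
      simp only [hget]
      rw [hscan] at *
      rw [hidx]
      simp only [Option.getD_some]
      rw [hslice, ih dw hlen (i + 1 + tw.length) _ (x + 1) hdrop htake' hnext, pvG]
      simp [htw, hdw]

-- B's fold with a live current run (leader c, collected rest cur) computes the greedy grouping
theorem pvBmain :
    ∀ (n : Nat) (xs : List Int), xs.length ≤ n → ∀ (acc : List (List Int)) (c : Int) (cur : List Int),
      pvFinB (xs.foldl pvStepB (acc, c :: cur))
        = acc ++ ((c :: cur) ++ xs.takeWhile (pvP c)) :: pvG (xs.dropWhile (pvP c)) := by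
  intro n
  induction n with
  | zero =>
    intro xs hn acc c cur
    have : xs = [] := List.eq_nil_of_length_eq_zero (by omega)
    subst this
    simp [pvFinB, pvG]
  | succ m ih =>
    intro xs hn acc c cur
    cases xs with
    | nil => simp [pvFinB, pvG]
    | cons x t =>
      have hlt : t.length ≤ m := by simp at hn; omega
      by_cases hc : x ≤ c + 1
      · have hstep : pvStepB (acc, c :: cur) x = (acc, c :: (cur ++ [x])) := by
          simp [pvStepB, hc]
        rw [List.foldl_cons, hstep, ih t hlt acc c (cur ++ [x])]
        simp [pvP, hc]
      · have hstep : pvStepB (acc, c :: cur) x = (acc ++ [c :: cur], [x]) := by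
          simp [pvStepB, hc]
        rw [List.foldl_cons, hstep, ih t hlt (acc ++ [c :: cur]) x []]
        have hpc : pvP c x = false := by simp [pvP]; omega
        simp only [List.takeWhile_cons, List.dropWhile_cons, hpc, Bool.false_eq_true,
          if_false]
        rw [pvG]
        simp

-- ===== VERDICT (by name: the statement is the Claim_ definition above) =====
theorem points_cover_sorted_spec : Claim_equal_points_cover_sorted := by
  intro sl _hdom
  unfold Spec_points_cover_sorted
  cases sl with
  | nil =>
    show pvOuterA [] 0 [] = points_cover_sorted_alt []
    rw [pvOuterA, dif_neg (by simp)]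
    rfl
  | cons x t =>
    have hA : points_cover_sorted (x :: t) = pvG (x :: t) := by
      show pvOuterA (x :: t) 0 [] = [] ++ pvG (x :: t)
      exact pvAmain (x :: t) (x :: t).length (x :: t) le_rfl 0 [] (x - 1) (by simp)
        (by simp) (by rintro x' t' ⟨rfl, rfl⟩; omega)
    have hB : points_cover_sorted_alt (x :: t) = pvG (x :: t) := by
      show pvFinB ((x :: t).foldl pvStepB ([], [])) = pvG (x :: t)
      rw [List.foldl_cons]
      have hstep : pvStepB ([], []) x = ([], [x]) := rfl
      rw [hstep, pvBmain t.length t le_rfl [] x []]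
      conv_rhs => rw [pvG]
      simp
    rw [hA, hB]
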